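-- pv_equiv track=rewrite | github.com/chachachachachaxxxxx/action_data_analysis | src/action_data_analysis/analyze/stats.py | _autodetect_stride
-- ===== SOURCE A (Python) =====
-- from typing import Any, Dict, List, Tuple, Optional
-- from collections import Counter
--
-- def _autodetect_stride(frame_indices: List[int]) -> int:
--   """根据帧序列数字自动估计采样间隔，返回最常见的正向差值，默认 1。"""
--   if not frame_indices or len(frame_indices) < 2:
--     return 1
--   diffs: Counter[int] = Counter()
--   prev = frame_indices[0]
--   for idx in frame_indices[1:]:
--     d = idx - prev
--     if d > 0:
--       diffs[d] += 1
--     prev = idx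
--   if not diffs:
--     return 1
--   return max(diffs.items(), key=lambda kv: (kv[1], -kv[0]))[0]
-- ===== SOURCE B (Python) =====
-- def _autodetect_stride(frame_indices):
--   """Sort the positive consecutive diffs and pick the value of the longest run
--   (first, i.e. smallest, on ties); default 1."""
--   if not frame_indices or len(frame_indices) < 2:
--     return 1
--   diffs = sorted(b - a for a, b in zip(frame_indices, frame_indices[1:]) if b - a > 0)
--   if not diffs:
--     return 1
--   best_val, best_len = diffs[0], 0
--   cur_val, cur_len = diffs[0], 0
--   for d in diffs:
--     if d == cur_val:
--       cur_len += 1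
--     else:
--       cur_val, cur_len = d, 1
--     if cur_len > best_len:
--       best_val, best_len = cur_val, cur_len
--   return best_val
-- ===== Notes on version B (the rewrite author's own statement) =====
-- stated objective: alternative
-- what changed: Replaces the Counter-plus-max-with-tuple-key selection by sorting the positive consecutive diffs and doing a single run-length scan that keeps the first (smallest) value of the longest run.
import Mathlib
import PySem

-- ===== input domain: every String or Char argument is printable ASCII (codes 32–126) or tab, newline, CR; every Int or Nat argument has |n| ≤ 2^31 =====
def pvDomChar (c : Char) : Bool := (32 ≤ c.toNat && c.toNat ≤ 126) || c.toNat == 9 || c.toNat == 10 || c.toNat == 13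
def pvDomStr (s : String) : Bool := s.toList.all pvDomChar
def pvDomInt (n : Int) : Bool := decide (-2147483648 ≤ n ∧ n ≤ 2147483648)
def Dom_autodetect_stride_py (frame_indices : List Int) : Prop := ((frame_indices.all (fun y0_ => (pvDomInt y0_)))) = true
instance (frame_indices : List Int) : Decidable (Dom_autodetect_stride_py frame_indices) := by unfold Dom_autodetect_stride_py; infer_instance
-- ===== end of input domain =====

-- B is an alternative implementation: instead of a Counter and max over items with
-- tuple key (count, -diff), it sorts the positive consecutive diffs and run-length
-- scans them once, keeping the first (smallest) value of the longest run.

-- ===== PORT A =====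
-- Counter(xs) loop + max(diffs.items(), key=lambda kv: (kv[1], -kv[0]))[0]
def autodetect_stride_py (frame_indices : List Int) : Int :=
  match frame_indices with
  | [] => 1
  | x :: rest =>
    if (x :: rest).length < 2 then 1
    else
      -- prev/diffs loop: state is (diffs, prev)
      let st := rest.foldl
        (fun (s : PySem.Dict Int Int × Int) idx =>
          ((if 0 < idx - s.2 then s.1.modify (idx - s.2) 0 (· + 1) else s.1), idx))
        (PySem.Dict.empty, x)
      if st.1.items = [] then 1
      else
        match PySem.List.max2? st.1.items (fun kv => kv.2) (fun kv => -kv.1) with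
        | some kv => kv.1
        | none => 1  -- unreachable: items ≠ []

-- ===== PORT B =====
-- the for-loop of Source B: state (best_val, best_len, cur_val, cur_len)
def pvBScan : List Int → Int → Int → Int → Int → Int
  | [], bv, _bl, _cv, _cl => bv
  | d :: t, bv, bl, cv, cl =>
    let cur := if d = cv then (cv, cl + 1) else (d, 1)
    if bl < cur.2 then pvBScan t cur.1 cur.2 cur.1 cur.2
    else pvBScan t bv bl cur.1 cur.2

def autodetect_stride_py_alt (frame_indices : List Int) : Int :=
  if frame_indices = [] ∨ frame_indices.length < 2 then 1
  else
    let diffs := PySem.List.sorted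
      (((frame_indices.zip (frame_indices.drop 1)).map (fun p => p.2 - p.1)).filter
        (fun d => decide (0 < d))) (fun x => x) false
    match diffs with
    | [] => 1
    | d0 :: _ => pvBScan diffs d0 0 d0 0

-- ===== PRECONDITION & SPEC =====
def Spec_autodetect_stride_py (frame_indices : List Int) (out : Int) : Prop := out = autodetect_stride_py_alt frame_indices
instance (frame_indices : List Int) (out : Int) : Decidable (Spec_autodetect_stride_py frame_indices out) := by unfold Spec_autodetect_stride_py; infer_instance

-- ===== CLAIM (what is proved, stated in full; the proofs are below) =====
def Claim_equal_autodetect_stride_py : Prop := ∀ (frame_indices : List Int), Dom_autodetect_stride_py frame_indices → Spec_autodetect_stride_py frame_indices (autodetect_stride_py frame_indices)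

-- ===== LEMMAS AND PROOFS =====

-- the list of positive consecutive differences, with x the previous element
def pvDiffs : Int → List Int → List Int
  | _, [] => []
  | x, y :: r => (if 0 < y - x then [y - x] else []) ++ pvDiffs y r

-- the value both programs compute: smallest element of l with maximal count
def pvBest (l : List Int) (m : Int) : Prop :=
  m ∈ l ∧ ∀ y ∈ l, (l.count y : Int) < l.count m ∨ ((l.count y : Int) = l.count m ∧ m ≤ y)

theorem pvBest_unique {l : List Int} {a b : Int} (ha : pvBest l a) (hb : pvBest l b) : a = b := by
  obtain ⟨hma, ha⟩ := ha
  obtain ⟨hmb, hb⟩ := hb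
  rcases ha b hmb with h | ⟨h1, h2⟩
  · rcases hb a hma with h' | ⟨h1', _⟩ <;> omega
  · rcases hb a hma with h' | ⟨_, h2'⟩
    · omega
    · omega

theorem pvBest_perm {l l' : List Int} {m : Int} (hp : l.Perm l') (h : pvBest l m) : pvBest l' m := by
  obtain ⟨hm, hb⟩ := h
  refine ⟨hp.mem_iff.mp hm, fun y hy => ?_⟩
  have := hb y (hp.mem_iff.mpr hy)
  rw [hp.count_eq y, hp.count_eq m] at this
  exact this

theorem pvDiffs_eq_zip (rest : List Int) : ∀ x : Int,
    pvDiffs x rest =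
      (((x :: rest).zip rest).map (fun p => p.2 - p.1)).filter (fun d => decide (0 < d)) := by
  induction rest with
  | nil => intro x; simp [pvDiffs]
  | cons y r ih =>
    intro x
    simp only [pvDiffs, List.zip_cons_cons, List.map_cons, List.filter_cons, ih y]
    by_cases h : x < y <;> simp [h]

-- A's fold accumulates exactly Counter(pvDiffs x rest)
theorem pvFoldA (rest : List Int) : ∀ (x : Int) (d : PySem.Dict Int Int),
    (rest.foldl
      (fun (s : PySem.Dict Int Int × Int) idx =>
        ((if 0 < idx - s.2 then s.1.modify (idx - s.2) 0 (· + 1) else s.1), idx))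
      (d, x)).1
    = (pvDiffs x rest).foldl (fun d v => d.modify v 0 (· + 1)) d := by
  induction rest with
  | nil => intro x d; simp [pvDiffs]
  | cons y r ih =>
    intro x d
    simp only [List.foldl_cons, pvDiffs, ih y]
    by_cases h : x < y <;> simp [h]

-- lexicographic "not greater" order used by max with key (count, -k)
def pvLexLe (k1 k2 : (Int × Int) → Int) (a b : Int × Int) : Prop :=
  k1 a < k1 b ∨ (k1 a = k1 b ∧ k2 a ≤ k2 b)

theorem pvMax2_fold (k1 k2 : (Int × Int) → Int)
    (step : Option (Int × Int) → (Int × Int) → Option (Int × Int))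
    (hstep : ∀ m x, step (some m) x =
      if (decide (k1 m < k1 x) || !decide (k1 x < k1 m) && decide (k2 m < k2 x)) = true
      then some x else some m)
    (xs : List (Int × Int)) :
    ∀ (m0 mf : Int × Int),
    xs.foldl step (some m0) = some mf →
    (mf = m0 ∨ mf ∈ xs) ∧ pvLexLe k1 k2 m0 mf ∧ ∀ y ∈ xs, pvLexLe k1 k2 y mf := by
  induction xs with
  | nil =>
    intro m0 mf h
    simp only [List.foldl_nil, Option.some.injEq] at h
    subst h
    exact ⟨Or.inl rfl, Or.inr ⟨rfl, le_refl _⟩, by simp⟩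
  | cons x t ih =>
    intro m0 mf h
    simp only [List.foldl_cons, hstep] at h
    by_cases hc : (decide (k1 m0 < k1 x) || !decide (k1 x < k1 m0) && decide (k2 m0 < k2 x)) = true
    · rw [if_pos hc] at h
      obtain ⟨hmem, hle, hall⟩ := ih x mf h
      simp only [Bool.or_eq_true, Bool.and_eq_true, Bool.not_eq_eq_eq_not, Bool.not_true,
        decide_eq_true_eq, decide_eq_false_iff_not] at hc
      have hx : pvLexLe k1 k2 m0 x := by unfold pvLexLe; omega
      refine ⟨?_, ?_, ?_⟩
      · rcases hmem with rfl | hm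
        · exact Or.inr List.mem_cons_self
        · exact Or.inr (List.mem_cons_of_mem _ hm)
      · unfold pvLexLe at hx hle ⊢; omega
      · intro y hy
        rcases List.mem_cons.mp hy with rfl | hyt
        · exact hle
        · exact hall y hyt
    · rw [if_neg hc] at h
      obtain ⟨hmem, hle, hall⟩ := ih m0 mf h
      simp only [Bool.or_eq_true, Bool.and_eq_true, Bool.not_eq_eq_eq_not, Bool.not_true,
        decide_eq_true_eq, decide_eq_false_iff_not] at hc
      have hx : pvLexLe k1 k2 x m0 := by unfold pvLexLe; omega
      refine ⟨?_, hle, ?_⟩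
      · rcases hmem with rfl | hm
        · exact Or.inl rfl
        · exact Or.inr (List.mem_cons_of_mem _ hm)
      · intro y hy
        rcases List.mem_cons.mp hy with rfl | hyt
        · unfold pvLexLe at hx hle ⊢; omega
        · exact hall y hyt

theorem pvMax2_isSome {A K1 K2 : Type} [LT K1] [DecidableLT K1] [LT K2] [DecidableLT K2]
    (xs : List A) (k1 : A → K1) (k2 : A → K2) (hne : xs ≠ []) :
    (PySem.List.max2? xs k1 k2).isSome := by
  unfold PySem.List.max2?
  rcases xs with _ | ⟨a, t⟩
  · exact absurd rfl hne
  · simp only [List.foldl_cons]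
    clear hne
    induction t generalizing a with
    | nil => simp
    | cons b t ih =>
      simp only [List.foldl_cons]
      by_cases hc : (decide (k1 a < k1 b) || !decide (k1 b < k1 a) && decide (k2 a < k2 b)) = true
      · rw [if_pos hc]; exact ih b
      · rw [if_neg hc]; exact ih a

-- A's returned key satisfies pvBest ds, for ds ≠ []
theorem pvA_best (ds : List Int) {kv : Int × Int}
    (h : PySem.List.max2? (PySem.Dict.counter ds).items (fun kv => kv.2) (fun kv => -kv.1)
          = some kv) :
    pvBest ds kv.1 := by
  rw [PySem.Dict.items_counter] at h
  unfold PySem.List.max2? at h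
  rcases hL : List.map (fun k => (k, (ds.count k : Int))) (PySem.Set.ofList ds) with _ | ⟨a, t⟩
  · rw [hL] at h; simp at h
  · rw [hL] at h
    simp only [List.foldl_cons] at h
    obtain ⟨hmem, hle0, hall⟩ := pvMax2_fold (fun kv => kv.2) (fun kv => -kv.1) _
      (fun m x => rfl) t a kv h
    have hall' : ∀ y ∈ List.map (fun k => (k, (ds.count k : Int))) (PySem.Set.ofList ds),
        pvLexLe (fun kv => kv.2) (fun kv => -kv.1) y kv := by
      intro y hy
      rw [hL] at hy
      rcases List.mem_cons.mp hy with rfl | hyt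
      · exact hle0
      · exact hall y hyt
    have hkv_mem : kv ∈ List.map (fun k => (k, (ds.count k : Int))) (PySem.Set.ofList ds) := by
      rw [hL]
      rcases hmem with rfl | hm
      · exact List.mem_cons_self
      · exact List.mem_cons_of_mem _ hm
    obtain ⟨k, hk, hkeq⟩ := List.mem_map.mp hkv_mem
    rw [PySem.Set.mem_ofList] at hk
    subst hkeq
    refine ⟨hk, fun y hy => ?_⟩
    have hy' : (y, (ds.count y : Int)) ∈
        List.map (fun k => (k, (ds.count k : Int))) (PySem.Set.ofList ds) :=
      List.mem_map.mpr ⟨y, (PySem.Set.mem_ofList ds y).mpr hy, rfl⟩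
    have hres := hall' _ hy'
    simp only [pvLexLe] at hres
    rcases hres with h1 | ⟨h1, h2⟩
    · exact Or.inl h1
    · exact Or.inr ⟨h1, by omega⟩

-- sorted prefix with last element c bounds every element
theorem pv_sorted_last_bound : ∀ (p : List Int) (c : Int),
    p.Pairwise (· ≤ ·) → p.getLast? = some c → ∀ y ∈ p, y ≤ c := by
  intro p c
  induction p with
  | nil => intro _ h; simp at h
  | cons a t ih =>
    intro hp hl y hy
    rcases t with _ | ⟨b, t2⟩
    · simp only [List.mem_singleton] at hy
      simp only [List.getLast?_singleton, Option.some.injEq] at hl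
      omega
    · have hl2 : (b :: t2).getLast? = some c := by
        rwa [List.getLast?_cons_cons] at hl
      rcases List.mem_cons.mp hy with rfl | hyt
      · exact (List.pairwise_cons.mp hp).1 c (List.mem_of_getLast? hl2)
      · exact ih (List.pairwise_cons.mp hp).2 hl2 y hyt

-- the run-length scan invariant
theorem pvBScan_inv : ∀ (t p : List Int) (bv bl cv cl : Int),
    (p ++ t).Pairwise (· ≤ ·) →
    p.getLast? = some cv →
    cl = (p.count cv : Int) →
    bv ∈ p →
    bl = (p.count bv : Int) →
    (∀ y ∈ p, (p.count y : Int) ≤ bl) →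
    (∀ y ∈ p, (p.count y : Int) = bl → bv ≤ y) →
    pvBest (p ++ t) (pvBScan t bv bl cv cl) := by
  intro t
  induction t with
  | nil =>
    intro p bv bl cv cl hpw _ _ hbv hbl h5 h6
    rw [List.append_nil]
    show pvBest p bv
    refine ⟨hbv, fun y hy => ?_⟩
    have h := h5 y hy
    by_cases he : (p.count y : Int) = bl
    · exact Or.inr ⟨by omega, h6 y hy he⟩
    · exact Or.inl (by omega)
  | cons d t' ih =>
    intro p bv bl cv cl hpw hlast hcl hbv hbl h5 h6
    have hcv_mem : cv ∈ p := List.mem_of_getLast? hlast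
    have hple : ∀ y ∈ p, y ≤ d := by
      intro y hy
      have := (List.pairwise_append.mp hpw).2.2
      exact this y hy d List.mem_cons_self
    have hpw_p : p.Pairwise (· ≤ ·) := (List.pairwise_append.mp hpw).1
    have hycv : ∀ y ∈ p, y ≤ cv := pv_sorted_last_bound p cv hpw_p hlast
    have hassoc : p ++ d :: t' = (p ++ [d]) ++ t' := by simp
    have hpw' : ((p ++ [d]) ++ t').Pairwise (· ≤ ·) := by rwa [← hassoc]
    have hlast' : (p ++ [d]).getLast? = some d := by simp
    have hbv' : bv ∈ p ++ [d] := List.mem_append_left _ hbv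
    have hcount_ne : ∀ y : Int, y ≠ d → ((p ++ [d]).count y : Int) = (p.count y : Int) := by
      intro y hyd
      simp [List.count_append, Ne.symm hyd]
    have hcount_d : ((p ++ [d]).count d : Int) = (p.count d : Int) + 1 := by
      simp [List.count_append]
    rw [hassoc]
    by_cases hdc : d = cv
    · -- extend current run
      subst hdc
      have hstep : pvBScan (d :: t') bv bl d cl =
          if bl < cl + 1 then pvBScan t' d (cl + 1) d (cl + 1)
          else pvBScan t' bv bl d (cl + 1) := by
        simp [pvBScan]
      rw [hstep]
      by_cases hgt : bl < cl + 1
      · rw [if_pos hgt]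
        apply ih (p ++ [d]) d (cl+1) d (cl+1) hpw' hlast'
          (by rw [hcount_d]; omega) (List.mem_append_right _ List.mem_cons_self)
          (by rw [hcount_d]; omega)
        · intro y hy
          by_cases hyd : y = d
          · subst hyd; rw [hcount_d]; omega
          · rw [hcount_ne y hyd]
            have hymem : y ∈ p := by
              rcases List.mem_append.mp hy with h | h
              · exact h
              · simp at h; exact absurd h hyd
            have := h5 y hymem; omega
        · intro y hy hcy
          by_cases hyd : y = d
          · subst hyd; exact le_refl _
          · exfalso
            rw [hcount_ne y hyd] at hcy
            have hymem : y ∈ p := by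
              rcases List.mem_append.mp hy with h | h
              · exact h
              · simp at h; exact absurd h hyd
            have := h5 y hymem; omega
      · rw [if_neg hgt]
        apply ih (p ++ [d]) bv bl d (cl+1) hpw' hlast'
          (by rw [hcount_d]; omega) hbv'
        · rw [hcount_ne bv ?hne]
          · exact hbl
          case hne =>
            intro h
            subst h
            have := h5 bv hbv
            have : (p.count bv : Int) = cl := by omega
            omega
        · intro y hy
          by_cases hyd : y = d
          · subst hyd; rw [hcount_d]; omega
          · rw [hcount_ne y hyd]
            have hymem : y ∈ p := by
              rcases List.mem_append.mp hy with h | h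
              · exact h
              · simp at h; exact absurd h hyd
            exact h5 y hymem
        · intro y hy hcy
          by_cases hyd : y = d
          · subst hyd
            exact hycv bv hbv
          · rw [hcount_ne y hyd] at hcy
            have hymem : y ∈ p := by
              rcases List.mem_append.mp hy with h | h
              · exact h
              · simp at h; exact absurd h hyd
            exact h6 y hymem hcy
    · -- new value d > cv, starts a fresh run of length 1
      have hcvd : cv < d := lt_of_le_of_ne (hple cv hcv_mem) (fun h => hdc h.symm)
      have hdnotp : d ∉ p := fun hd => absurd (hycv d hd) (not_le.mpr hcvd)
      have hcountd0 : (p.count d : Nat) = 0 := List.count_eq_zero.mpr hdnotp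
      have hbl1 : 1 ≤ bl := by
        have := List.count_pos_iff.mpr hbv
        omega
      have hstep : pvBScan (d :: t') bv bl cv cl =
          if bl < 1 then pvBScan t' d 1 d 1 else pvBScan t' bv bl d 1 := by
        simp [pvBScan, hdc]
      rw [hstep, if_neg (by omega : ¬ bl < (1:Int))]
      apply ih (p ++ [d]) bv bl d 1 hpw' hlast'
        (by rw [hcount_d]; omega) hbv'
      · rw [hcount_ne bv (fun h => hdnotp (h ▸ hbv))]; exact hbl
      · intro y hy
        by_cases hyd : y = d
        · subst hyd; rw [hcount_d]; omega
        · rw [hcount_ne y hyd]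
          have hymem : y ∈ p := by
            rcases List.mem_append.mp hy with h | h
            · exact h
            · simp at h; exact absurd h hyd
          exact h5 y hymem
      · intro y hy hcy
        by_cases hyd : y = d
        · subst hyd
          exact le_of_lt (lt_of_le_of_lt (hycv bv hbv) hcvd)
        · rw [hcount_ne y hyd] at hcy
          have hymem : y ∈ p := by
            rcases List.mem_append.mp hy with h | h
            · exact h
            · simp at h; exact absurd h hyd
          exact h6 y hymem hcy

theorem pvB_best (s : List Int) (hs : s.Pairwise (· ≤ ·)) (d0 : Int) (rest : List Int)
    (hcons : s = d0 :: rest) : pvBest s (pvBScan s d0 0 d0 0) := by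
  subst hcons
  have hstep : pvBScan (d0 :: rest) d0 0 d0 0 = pvBScan rest d0 1 d0 1 := by
    simp [pvBScan]
  rw [hstep]
  have h01 : d0 :: rest = [d0] ++ rest := rfl
  rw [h01]
  apply pvBScan_inv rest [d0] d0 1 d0 1
  · rwa [← h01]
  · simp
  · simp
  · simp
  · simp
  · intro y hy; simp only [List.mem_singleton] at hy; subst hy; simp
  · intro y hy _; simp only [List.mem_singleton] at hy; subst hy; exact le_refl _

-- ===== VERDICT (by name: the statement is the Claim_ definition above) =====
theorem autodetect_stride_py_spec : Claim_equal_autodetect_stride_py := by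
  intro fi _
  unfold Spec_autodetect_stride_py
  match fi with
  | [] => rfl
  | [x] => rfl
  | x :: y :: rest =>
    have hgA : ¬ (x :: y :: rest).length < 2 := by simp only [List.length_cons]; omega
    have hgB : ¬ (x :: y :: rest = [] ∨ (x :: y :: rest).length < 2) := not_or.mpr ⟨by simp, hgA⟩
    have hfold := pvFoldA (y :: rest) x PySem.Dict.empty
    have hzip : List.filter (fun d => decide (0 < d))
        (List.map (fun p => p.2 - p.1) ((x :: y :: rest).zip (List.drop 1 (x :: y :: rest))))
        = pvDiffs x (y :: rest) := (pvDiffs_eq_zip (y :: rest) x).symm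
    simp only [autodetect_stride_py, autodetect_stride_py_alt, if_neg hgA, if_neg hgB,
      hfold, hzip, ← PySem.Dict.counter_eq_foldl]
    generalize pvDiffs x (y :: rest) = ds
    by_cases hnil : ds = []
    · subst hnil
      rfl
    · have hitems_ne : (PySem.Dict.counter ds).items ≠ [] := by
        rw [PySem.Dict.items_counter]
        obtain ⟨a, ha⟩ := List.exists_mem_of_ne_nil ds hnil
        intro hmap
        have ha2 : a ∈ PySem.Set.ofList ds := (PySem.Set.mem_ofList ds a).mpr ha
        rw [List.map_eq_nil_iff.mp hmap] at ha2
        simp at ha2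
      rw [if_neg hitems_ne]
      have hsorted_ne : PySem.List.sorted ds (fun x => x) false ≠ [] := by
        rw [Ne, PySem.List.sorted_eq_nil_iff]; exact hnil
      match hmax : PySem.List.max2? (PySem.Dict.counter ds).items (fun kv => kv.2) (fun kv => -kv.1) with
      | none =>
        exfalso
        have := pvMax2_isSome (PySem.Dict.counter ds).items
          (fun kv : Int × Int => kv.2) (fun kv : Int × Int => -kv.1) hitems_ne
        rw [hmax] at this
        simp at this
      | some kv =>
        have hA : pvBest ds kv.1 := pvA_best ds hmax
        match hsrt : PySem.List.sorted ds (fun x => x) false, hsorted_ne with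
        | d0 :: srest, _ =>
          have hperm : (d0 :: srest).Perm ds := hsrt ▸ PySem.List.sorted_perm ds (fun x => x) false
          have hpw : (d0 :: srest).Pairwise (· ≤ ·) := by
            have := PySem.List.sorted_pairwise ds (fun x : Int => x)
            rwa [hsrt] at this
          have hB := pvB_best (d0 :: srest) hpw d0 srest rfl
          have hB2 : pvBest ds (pvBScan (d0 :: srest) d0 0 d0 0) := pvBest_perm hperm hB
          show kv.1 = pvBScan (d0 :: srest) d0 0 d0 0
          exact pvBest_unique hA hB2
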